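-- pv_equiv track=rewrite | github.com/Ashiq-am/Data-Structures-Algorithm | 1.Python Algorithms/8.Bitwise Algorithms/1.Basic/96.Set all even bits of a number/Example 1.py | evenbitsetnumber
-- ===== SOURCE A (Python) =====
-- def evenbitsetnumber(n):
--     # Generate 101010...10 number and
--     # store in res.
--     count = 0
--     res = 0
--     temp = n
--     while (temp > 0):
--
--         # if bit is even then generate
--         # number and or with res
--         if (count % 2 == 1):
--             res |= (1 << count)
--
--         count += 1
--         temp >>= 1
--
--     # return OR number
--     return (n | res)
-- ===== SOURCE B (Python) =====
-- def evenbitsetnumber(n):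
--     # closed-form mask of all odd-position bits below n's bit length
--     L = n.bit_length() if n > 0 else 0
--     return n | (2 * (4 ** (L // 2) - 1) // 3)
-- ===== Notes on version B (the rewrite author's own statement) =====
-- stated objective: simpler
-- what changed: replaces the per-bit while-loop that ORs 1<<count for each odd count below the bit length with a single closed-form mask 2*(4**(L//2)-1)//3 computed from n.bit_length(), OR'd with n once
import Mathlib
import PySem

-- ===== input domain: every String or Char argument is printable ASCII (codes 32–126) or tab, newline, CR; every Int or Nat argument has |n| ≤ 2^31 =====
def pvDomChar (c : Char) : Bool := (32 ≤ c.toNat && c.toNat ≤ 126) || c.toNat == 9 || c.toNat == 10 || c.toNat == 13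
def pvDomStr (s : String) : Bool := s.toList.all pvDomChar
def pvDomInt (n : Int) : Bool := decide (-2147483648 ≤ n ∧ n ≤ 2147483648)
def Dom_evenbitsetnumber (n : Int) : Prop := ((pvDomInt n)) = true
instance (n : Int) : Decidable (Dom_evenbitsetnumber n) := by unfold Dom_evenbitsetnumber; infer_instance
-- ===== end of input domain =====

-- B replaces A's per-bit while-loop with one closed-form arithmetic mask (simpler, no loop).


-- ===== PORT A =====
-- A's while-loop: temp halves each step, count counts bits, res collects 1<<count for odd count.
def evenbitsetnumberLoop (temp : Int) (count : Nat) (res : Int) : Int :=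
  if 0 < temp then
    evenbitsetnumberLoop (temp >>> (1:Nat)) (count + 1)
      (if count % 2 == 1 then PySem.Int.bor res (1 <<< count) else res)
  else res
termination_by temp.toNat
decreasing_by
  have h1 : temp >>> (1:Nat) = temp / 2 := by rw [Int.shiftRight_eq_div_pow]; norm_num
  omega

def evenbitsetnumber (n : Int) : Int :=
  PySem.Int.bor n (evenbitsetnumberLoop n 0 0)

-- ===== PORT B =====
def evenbitsetnumber_alt (n : Int) : Int :=
  let L : Nat := if 0 < n then PySem.Int.bitLength n else 0
  PySem.Int.bor n (PySem.Int.floordiv (2 * (4 ^ (L / 2) - 1)) 3)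

-- ===== PRECONDITION & SPEC =====
def Spec_evenbitsetnumber (n : Int) (out : Int) : Prop := out = evenbitsetnumber_alt n
instance (n : Int) (out : Int) : Decidable (Spec_evenbitsetnumber n out) := by unfold Spec_evenbitsetnumber; infer_instance

-- ===== CLAIM (what is proved, stated in full; the proofs are below) =====
def Claim_equal_evenbitsetnumber : Prop := ∀ (n : Int), Dom_evenbitsetnumber n → Spec_evenbitsetnumber n (evenbitsetnumber n)

-- ===== LEMMAS AND PROOFS =====

-- Nat-level closed forms: mask of odd positions (resp. even positions) below L.
def oddMaskN (L : Nat) : Nat := 2 * (4 ^ (L / 2) - 1) / 3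
def evenMaskN (L : Nat) : Nat := (4 ^ ((L + 1) / 2) - 1) / 3

theorem three_dvd_pow4_sub_one (m : Nat) : 3 ∣ 4 ^ m - 1 := by
  induction m with
  | zero => simp
  | succ k ih =>
    obtain ⟨j, hj⟩ := ih
    have h1 : 1 ≤ 4 ^ k := Nat.one_le_pow _ _ (by omega)
    refine ⟨4 * j + 1, ?_⟩
    have : 4 ^ (k + 1) = 4 * 4 ^ k := by ring
    omega

theorem oddMaskN_succ (L : Nat) : oddMaskN (L + 1) = 2 * evenMaskN L := by
  unfold oddMaskN evenMaskN
  obtain ⟨j, hj⟩ := three_dvd_pow4_sub_one ((L + 1) / 2)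
  omega

theorem evenMaskN_succ (L : Nat) : evenMaskN (L + 1) = 2 * oddMaskN L + 1 := by
  unfold oddMaskN evenMaskN
  have hstep : (L + 1 + 1) / 2 = L / 2 + 1 := by omega
  rw [hstep]
  obtain ⟨j, hj⟩ := three_dvd_pow4_sub_one (L / 2)
  have h1 : 1 ≤ 4 ^ (L / 2) := Nat.one_le_pow _ _ (by omega)
  have h4 : 4 ^ (L / 2 + 1) = 4 * 4 ^ (L / 2) := by ring
  omega

theorem two_mul_lor_one (x : Nat) : 2 * x ||| 1 = 2 * x + 1 := by
  apply Nat.eq_of_testBit_eq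
  intro i
  simp only [Nat.testBit_or]
  cases i with
  | zero => simp
  | succ j => simp [Nat.testBit_add_one, Nat.mul_add_div]

theorem pow_lor_shift (c x : Nat) : 2 ^ c ||| 2 ^ (c + 1) * x = 2 ^ c * (2 * x + 1) := by
  have h1 : 2 ^ c = 1 <<< c := by simp [Nat.one_shiftLeft]
  have h2 : 2 ^ (c + 1) * x = (2 * x) <<< c := by
    rw [Nat.shiftLeft_eq]; ring
  have h3 : 2 ^ c * (2 * x + 1) = (2 * x + 1) <<< c := by
    rw [Nat.shiftLeft_eq]; ring
  rw [h2, h3, h1, Nat.shiftLeft_or_distrib.symm, Nat.lor_comm, two_mul_lor_one]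

-- cast helper for the loop step
theorem cast_shiftRight (t : Nat) : ((t : Int) >>> (1:Nat)) = ((t / 2 : Nat) : Int) :=
  Int.mem_toNat?.mp rfl

-- the loop invariant: starting at counter c with accumulator r (both naturals),
-- the loop ORs in the mask of odd/even positions (by the parity of c) shifted by c.
theorem loop_eq (t : Nat) : ∀ (c r : Nat),
    evenbitsetnumberLoop (t : Int) c (r : Int) =
      ((r ||| 2 ^ c * (if c % 2 = 0 then oddMaskN (PySem.Int.bitLength (t : Int))
                       else evenMaskN (PySem.Int.bitLength (t : Int))) : Nat) : Int) := by
  induction t using Nat.strong_induction_on with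
  | _ t ih =>
    intro c r
    rw [evenbitsetnumberLoop]
    by_cases ht : 0 < t
    · have htI : (0 : Int) < (t : Int) := by exact_mod_cast ht
      rw [if_pos htI, cast_shiftRight]
      have hbl : PySem.Int.bitLength (t : Int) =
          PySem.Int.bitLength ((t / 2 : Nat) : Int) + 1 := PySem.Int.bitLength_natCast ht
      have hlt : t / 2 < t := Nat.div_lt_self ht (by omega)
      by_cases hc : c % 2 = 0
      · -- even counter: no bit added this round
        have : ¬ (c % 2 == 1) = true := by simp [hc]
        rw [if_neg this, ih (t / 2) hlt (c + 1) r]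
        have hc1 : (c + 1) % 2 ≠ 0 := by omega
        rw [if_neg hc1, if_pos hc, hbl, oddMaskN_succ]
        ring_nf
      · -- odd counter: OR in 1 <<< c = 2^c
        have : (c % 2 == 1) = true := by simp only [beq_iff_eq]; omega
        rw [if_pos this]
        rw [show PySem.Int.bor (r : Int) (((1 <<< c : Nat)) : Int)
              = (((r ||| (1 <<< c) : Nat)) : Int) from PySem.Int.bor_natCast r _]
        rw [ih (t / 2) hlt (c + 1) (r ||| (1 <<< c))]
        have hc1 : (c + 1) % 2 = 0 := by omega
        rw [if_pos hc1, if_neg hc, hbl, evenMaskN_succ]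
        congr 1
        rw [Nat.lor_assoc, Nat.one_shiftLeft, pow_lor_shift]
    · have htI : ¬ (0 : Int) < (t : Int) := by exact_mod_cast ht
      rw [if_neg htI]
      have ht0 : t = 0 := by omega
      subst ht0
      simp [PySem.Int.bitLength_zero, oddMaskN, evenMaskN]

-- B's Int mask equals the Nat closed form
theorem mask_cast (L : Nat) :
    PySem.Int.floordiv (2 * (4 ^ (L / 2) - 1)) 3 = ((oddMaskN L : Nat) : Int) := by
  have h1 : 1 ≤ (4:Nat) ^ (L / 2) := Nat.one_le_pow _ _ (by omega)
  have hcast : (2 * (4 ^ (L / 2) - 1) : Int) = ((2 * (4 ^ (L / 2) - 1) : Nat) : Int) := by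
    push_cast [h1]; ring
  rw [hcast]
  rw [show ((3:Int)) = ((3:Nat):Int) from rfl, PySem.Int.floordiv_natCast]
  rfl

theorem loop_neg (n : Int) (h : ¬ 0 < n) : evenbitsetnumberLoop n 0 0 = 0 := by
  rw [evenbitsetnumberLoop, if_neg h]

-- ===== VERDICT (by name: the statement is the Claim_ definition above) =====
theorem evenbitsetnumber_spec : Claim_equal_evenbitsetnumber := by
  intro n _
  show evenbitsetnumber n = evenbitsetnumber_alt n
  simp only [evenbitsetnumber, evenbitsetnumber_alt]
  by_cases h : 0 < n
  · have hn : n = ((n.toNat : Nat) : Int) := by omega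
    rw [if_pos h, mask_cast]
    congr 1
    rw [hn, show ((0:Int)) = ((0:Nat):Int) from rfl, loop_eq n.toNat 0 0]
    norm_num
  · rw [if_neg h, loop_neg n h]
    norm_num
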